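-- pv_equiv track=rewrite | github.com/ebuehrle/advent-of-code-2020 | 7/p12.py | get_containers
-- ===== SOURCE A (Python) =====
-- def get_containers(bag_color, inv_digraph):
--     visited = set()
--     found = set()
--
--     def dfs(bag_color, inv_digraph, visited, found):
--         if bag_color in visited or bag_color not in inv_digraph:
--             return
--
--         visited.add(bag_color)
--
--         for container_color in inv_digraph[bag_color]:
--             found.add(container_color)
--             dfs(container_color, inv_digraph, visited, found)
--
--     dfs(bag_color, inv_digraph, visited, found)
--     return found
-- ===== SOURCE B (Python) =====
-- def get_containers(bag_color, inv_digraph):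
--     visited = set()
--     found = set()
--     if bag_color in inv_digraph:
--         visited.add(bag_color)
--         stack = [(list(inv_digraph[bag_color]), 0)]
--     else:
--         stack = []
--     while stack:
--         children, i = stack.pop()
--         if i >= len(children):
--             continue
--         stack.append((children, i + 1))
--         c = children[i]
--         found.add(c)
--         if c not in visited and c in inv_digraph:
--             visited.add(c)
--             stack.append((list(inv_digraph[c]), 0))
--     return found
-- ===== Notes on version B (the rewrite author's own statement) =====
-- stated objective: alternative
-- what changed: The recursive nested-function DFS is replaced by an iterative loop over an explicit stack of (children-list, index) frames that visits nodes in the same order, avoiding Python's recursion-depth limit.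
import Mathlib
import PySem

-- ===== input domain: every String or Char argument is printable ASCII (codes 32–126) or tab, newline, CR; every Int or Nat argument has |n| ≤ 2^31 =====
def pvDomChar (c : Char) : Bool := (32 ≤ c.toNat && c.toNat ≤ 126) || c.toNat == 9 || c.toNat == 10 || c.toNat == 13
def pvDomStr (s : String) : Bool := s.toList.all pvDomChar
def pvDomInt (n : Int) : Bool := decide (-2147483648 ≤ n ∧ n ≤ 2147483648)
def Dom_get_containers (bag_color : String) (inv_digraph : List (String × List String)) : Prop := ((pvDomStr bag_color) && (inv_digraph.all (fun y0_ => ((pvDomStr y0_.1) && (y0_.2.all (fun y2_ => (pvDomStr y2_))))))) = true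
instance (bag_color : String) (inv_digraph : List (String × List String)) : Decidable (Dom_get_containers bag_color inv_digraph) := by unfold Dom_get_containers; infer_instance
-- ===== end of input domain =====

-- B replaces A's recursive nested-function DFS with an iterative explicit-stack loop
-- that visits nodes in the same order, so the found/visited sets are built identically.

-- ===== PORT A =====
-- Python A: recursive nested dfs mutating `visited` and `found`.  The Nat fuel is ONLY a
-- totality guard: each recursion level marks a fresh dict key visited, so
-- `inv_digraph.length + 1` can never run out (dfsA_irrel below shows the result is
-- fuel-independent once the fuel exceeds the number of unvisited keys).
def dfsA (inv : List (String × List String)) : Nat → String → PySem.Set String → PySem.Set String → PySem.Set String × PySem.Set String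
  | 0, _, v, f => (v, f)
  | fuel+1, b, v, f =>
    if PySem.Set.contains v b || !((PySem.Dict.mk inv).contains b) then (v, f)
    else
      ((PySem.Dict.mk inv).getD b []).foldl
        (fun vf c => dfsA inv fuel c vf.1 (PySem.Set.add vf.2 c)) (PySem.Set.add v b, f)

def get_containers (bag_color : String) (inv_digraph : List (String × List String)) : List String :=
  (dfsA inv_digraph (inv_digraph.length + 1) bag_color PySem.Set.empty PySem.Set.empty).2

-- ===== PORT B =====
-- number of dict entries whose key is not yet visited (termination measure, fst component)
def muB (inv : List (String × List String)) (v : PySem.Set String) : Nat :=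
  (inv.filter (fun p => !(PySem.Set.contains v p.1))).length

-- remaining work of one stack frame / of the whole stack (termination measure, snd component)
def pvFrameW (fr : List String × Nat) : Nat := (fr.1.length - fr.2) + 1
def pvStackW (stack : List (List String × Nat)) : Nat := (stack.map pvFrameW).sum

-- generic strict filter-length comparison, used by muB_add_lt
lemma pvFilterLengthLt {α : Type} (p q : α → Bool) (himp : ∀ a, p a = true → q a = true) :
    ∀ (l : List α) (e : α), e ∈ l → q e = true → p e = false →
      (l.filter p).length < (l.filter q).length := by
  intro l
  induction l with
  | nil => intro e he; cases he
  | cons a l ih =>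
    intro e he hq hp
    rcases List.mem_cons.1 he with rfl | he'
    · rw [List.filter_cons, List.filter_cons, hp, hq]
      simp only [Bool.false_eq_true, if_false, if_true, List.length_cons]
      have := List.Sublist.length_le (List.monotone_filter_right l himp)
      omega
    · rw [List.filter_cons, List.filter_cons]
      have hlt := ih e he' hq hp
      cases hpa : p a
      · cases hqa : q a <;> simp <;> omega
      · rw [himp a hpa]; simp; omega

-- visiting a fresh key strictly shrinks the unvisited-key count (cited by loopB's decreasing_by)
lemma muB_add_lt (inv : List (String × List String)) (v : PySem.Set String) (c : String)
    (hc : PySem.Set.contains v c = false) (hk : (PySem.Dict.mk inv).contains c = true) :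
    muB inv (PySem.Set.add v c) < muB inv v := by
  have hmem : c ∈ inv.map Prod.fst := by
    have := (PySem.Dict.contains_iff_mem_keys (d := PySem.Dict.mk inv) (k := c)).1 hk
    simpa [PySem.Dict.keys] using this
  obtain ⟨e, he, he1⟩ := List.mem_map.1 hmem
  have hadd : PySem.Set.add v c = v ++ [c] := PySem.Set.add_of_not_mem (by simpa using hc)
  unfold muB
  have himp : ∀ a : String × List String,
      (!(PySem.Set.contains (PySem.Set.add v c) a.1)) = true → (!(PySem.Set.contains v a.1)) = true := by
    intro a ha
    have ha' : a.1 ∉ PySem.Set.add v c := by simpa using ha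
    have hnv : a.1 ∉ v := fun hm => ha' (by rw [hadd]; exact List.mem_append_left _ hm)
    simpa using hnv
  have hq : (!(PySem.Set.contains v e.1)) = true := by
    have : c ∉ v := by simpa using hc
    simpa [he1] using this
  have hp : (!(PySem.Set.contains (PySem.Set.add v c) e.1)) = false := by
    have : c ∈ PySem.Set.add v c := by rw [hadd]; exact List.mem_append_right _ (by simp)
    simpa [he1] using this
  exact pvFilterLengthLt _ _ himp inv e he hq hp

-- Python B: iterative DFS over an explicit stack of (children-list, next-index) frames.
-- Stack top is kept at the list head (Python appends/pops at the end: same LIFO order).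
-- `children.getD i ""` is Python's `children[i]`, guarded by the bound check above it.
def loopB (inv : List (String × List String)) (stack : List (List String × Nat))
    (v f : PySem.Set String) : PySem.Set String × PySem.Set String :=
  match stack with
  | [] => (v, f)
  | (children, i) :: rest =>
    if _hlen : children.length ≤ i then
      loopB inv rest v f
    else
      let c := children.getD i ""
      let f' := PySem.Set.add f c
      if hg : (!(PySem.Set.contains v c) && (PySem.Dict.mk inv).contains c) = true then
        loopB inv (((PySem.Dict.mk inv).getD c [], 0) :: (children, i + 1) :: rest) (PySem.Set.add v c) f'
      else
        loopB inv ((children, i + 1) :: rest) v f'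
termination_by (muB inv v, pvStackW stack)
decreasing_by
  · apply Prod.Lex.right; simp [pvStackW, pvFrameW]
  · apply Prod.Lex.left
    have hg' := hg
    simp only [Bool.and_eq_true, Bool.not_eq_true'] at hg'
    exact muB_add_lt inv v _ hg'.1 hg'.2
  · apply Prod.Lex.right; simp [pvStackW, pvFrameW]; omega

def get_containers_alt (bag_color : String) (inv_digraph : List (String × List String)) : List String :=
  if (PySem.Dict.mk inv_digraph).contains bag_color then
    (loopB inv_digraph [((PySem.Dict.mk inv_digraph).getD bag_color [], 0)]
      (PySem.Set.add PySem.Set.empty bag_color) PySem.Set.empty).2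
  else
    (loopB inv_digraph [] PySem.Set.empty PySem.Set.empty).2

-- ===== PRECONDITION & SPEC =====
def Spec_get_containers (bag_color : String) (inv_digraph : List (String × List String)) (out : List String) : Prop := out = get_containers_alt bag_color inv_digraph
instance (bag_color : String) (inv_digraph : List (String × List String)) (out : List String) : Decidable (Spec_get_containers bag_color inv_digraph out) := by unfold Spec_get_containers; infer_instance

-- ===== CLAIM (what is proved, stated in full; the proofs are below) =====
def Claim_equal_get_containers : Prop := ∀ (bag_color : String) (inv_digraph : List (String × List String)), Dom_get_containers bag_color inv_digraph → Spec_get_containers bag_color inv_digraph (get_containers bag_color inv_digraph)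

-- ===== LEMMAS AND PROOFS =====

lemma set_add_prefix (s : PySem.Set String) (x : String) : s <+: PySem.Set.add s x := by
  rw [PySem.Set.add_eq_ite]; split
  · exact List.prefix_refl s
  · exact List.prefix_append s [x]

-- growing the visited set cannot increase the unvisited-key count
lemma muB_mono (inv : List (String × List String)) {v v' : PySem.Set String} (h : v <+: v') :
    muB inv v' ≤ muB inv v := by
  unfold muB
  apply List.Sublist.length_le
  apply List.monotone_filter_right
  intro a ha
  have ha' : a.1 ∉ v' := by simpa using ha
  have : a.1 ∉ v := fun hm => ha' (List.IsPrefix.mem hm h)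
  simpa using this

-- a fold of visited-extending steps extends visited
lemma foldl_prefix (g : String → PySem.Set String → PySem.Set String → PySem.Set String × PySem.Set String)
    (hg : ∀ c v f, v <+: (g c v f).1) :
    ∀ (cs : List String) (vf : PySem.Set String × PySem.Set String),
      vf.1 <+: (cs.foldl (fun vf c => g c vf.1 (PySem.Set.add vf.2 c)) vf).1 := by
  intro cs
  induction cs with
  | nil => intro vf; exact List.prefix_refl _
  | cons c cs ih =>
    intro vf
    simp only [List.foldl_cons]
    exact List.IsPrefix.trans (hg c vf.1 (PySem.Set.add vf.2 c)) (ih _)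

lemma dfsA_prefix (inv : List (String × List String)) :
    ∀ (fuel : Nat) (b : String) (v f : PySem.Set String), v <+: (dfsA inv fuel b v f).1 := by
  intro fuel
  induction fuel with
  | zero => intro b v f; exact List.prefix_refl _
  | succ fuel ih =>
    intro b v f
    simp only [dfsA]
    split
    · exact List.prefix_refl _
    · exact List.IsPrefix.trans (set_add_prefix v b)
        (foldl_prefix (fun c v f => dfsA inv fuel c v f) (fun c v f => ih c v f)
          ((PySem.Dict.mk inv).getD b []) (PySem.Set.add v b, f))

-- two step functions that agree under an invariant preserved by the first give equal folds
lemma foldl_step_congr (g1 g2 : String → PySem.Set String → PySem.Set String → PySem.Set String × PySem.Set String)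
    (P : PySem.Set String → Prop)
    (h12 : ∀ c v f, P v → g1 c v f = g2 c v f)
    (hpres : ∀ c v f, P v → P ((g1 c v f).1)) :
    ∀ (cs : List String) (vf : PySem.Set String × PySem.Set String), P vf.1 →
      cs.foldl (fun vf c => g1 c vf.1 (PySem.Set.add vf.2 c)) vf
        = cs.foldl (fun vf c => g2 c vf.1 (PySem.Set.add vf.2 c)) vf := by
  intro cs
  induction cs with
  | nil => intro vf _; rfl
  | cons c cs ih =>
    intro vf hP
    simp only [List.foldl_cons]
    rw [← h12 c vf.1 (PySem.Set.add vf.2 c) hP]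
    exact ih _ (hpres c vf.1 _ hP)

-- the result of dfsA does not depend on the fuel once it exceeds the unvisited-key count
lemma dfsA_irrel (inv : List (String × List String)) :
    ∀ (n : Nat) (v : PySem.Set String), muB inv v ≤ n → ∀ (b : String) (f : PySem.Set String) (m k : Nat),
      n < m → n < k → dfsA inv m b v f = dfsA inv k b v f := by
  intro n
  induction n using Nat.strong_induction_on with
  | _ n ihn =>
    intro v hv b f m k hm hk
    obtain ⟨m', rfl⟩ : ∃ m', m = m' + 1 := ⟨m - 1, by omega⟩
    obtain ⟨k', rfl⟩ : ∃ k', k = k' + 1 := ⟨k - 1, by omega⟩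
    simp only [dfsA]
    cases hguard : (PySem.Set.contains v b || !((PySem.Dict.mk inv).contains b)) with
    | true => simp
    | false =>
      simp only [Bool.false_eq_true, if_false]
      have hvb : PySem.Set.contains v b = false ∧ (PySem.Dict.mk inv).contains b = true := by
        revert hguard
        cases PySem.Set.contains v b <;> cases (PySem.Dict.mk inv).contains b <;> simp
      have hlt : muB inv (PySem.Set.add v b) < muB inv v := muB_add_lt inv v b hvb.1 hvb.2
      apply foldl_step_congr (fun c v f => dfsA inv m' c v f) (fun c v f => dfsA inv k' c v f)
        (fun v' => muB inv v' ≤ muB inv (PySem.Set.add v b))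
      · intro c v' f' hP
        exact ihn (muB inv (PySem.Set.add v b)) (by omega) v' hP c f' m' k' (by omega) (by omega)
      · intro c v' f' hP
        exact le_trans (muB_mono inv (dfsA_prefix inv m' c v' f')) hP
      · exact le_refl _

-- dfsA with self-normalizing fuel: "the" value of A's dfs
def dfsI (inv : List (String × List String)) (b : String) (v f : PySem.Set String) :
    PySem.Set String × PySem.Set String :=
  dfsA inv (muB inv v + 1) b v f

lemma dfsI_prefix (inv : List (String × List String)) (b : String) (v f : PySem.Set String) :
    v <+: (dfsI inv b v f).1 := dfsA_prefix inv _ b v f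

lemma dfsI_eq (inv : List (String × List String)) (b : String) (v f : PySem.Set String) :
    dfsI inv b v f =
      if PySem.Set.contains v b || !((PySem.Dict.mk inv).contains b) then (v, f)
      else ((PySem.Dict.mk inv).getD b []).foldl
        (fun vf c => dfsI inv c vf.1 (PySem.Set.add vf.2 c)) (PySem.Set.add v b, f) := by
  unfold dfsI
  simp only [dfsA]
  cases hguard : (PySem.Set.contains v b || !((PySem.Dict.mk inv).contains b)) with
  | true => simp
  | false =>
    simp only [Bool.false_eq_true, if_false]
    have hvb : PySem.Set.contains v b = false ∧ (PySem.Dict.mk inv).contains b = true := by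
      revert hguard
      cases PySem.Set.contains v b <;> cases (PySem.Dict.mk inv).contains b <;> simp
    have hlt : muB inv (PySem.Set.add v b) < muB inv v := muB_add_lt inv v b hvb.1 hvb.2
    apply foldl_step_congr (fun c v' f' => dfsA inv (muB inv v) c v' f') (fun c v' f' => dfsI inv c v' f')
      (fun v' => muB inv v' ≤ muB inv (PySem.Set.add v b))
    · intro c v' f' hP
      exact dfsA_irrel inv (muB inv v') v' (le_refl _) c f' (muB inv v) (muB inv v' + 1) (by omega) (by omega)
    · intro c v' f' hP
      exact le_trans (muB_mono inv (dfsA_prefix inv (muB inv v) c v' f')) hP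
    · exact le_refl _

-- unfolding equations for loopB
lemma loopB_nil (inv : List (String × List String)) (v f : PySem.Set String) :
    loopB inv [] v f = (v, f) := by rw [loopB]

lemma loopB_done (inv : List (String × List String)) (children : List String) (i : Nat)
    (rest : List (List String × Nat)) (v f : PySem.Set String) (h : children.length ≤ i) :
    loopB inv ((children, i) :: rest) v f = loopB inv rest v f := by
  rw [loopB]; simp [h]

lemma loopB_step (inv : List (String × List String)) (children : List String) (i : Nat)
    (rest : List (List String × Nat)) (v f : PySem.Set String) (h : ¬ children.length ≤ i) :
    loopB inv ((children, i) :: rest) v f =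
      if (!(PySem.Set.contains v (children.getD i "")) && (PySem.Dict.mk inv).contains (children.getD i "")) = true then
        loopB inv (((PySem.Dict.mk inv).getD (children.getD i "") [], 0) :: (children, i + 1) :: rest)
          (PySem.Set.add v (children.getD i "")) (PySem.Set.add f (children.getD i ""))
      else
        loopB inv ((children, i + 1) :: rest) v (PySem.Set.add f (children.getD i "")) := by
  rw [loopB]; simp [h]

-- B's loop, processing one frame, computes exactly A's fold over the remaining children
lemma simLoop (inv : List (String × List String)) :
    ∀ (n : Nat) (v : PySem.Set String), muB inv v ≤ n →
    ∀ (k : Nat) (children : List String) (i : Nat), children.length - i ≤ k →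
    ∀ (rest : List (List String × Nat)) (f : PySem.Set String),
      loopB inv ((children, i) :: rest) v f
        = (let w := (children.drop i).foldl
            (fun vf c => dfsI inv c vf.1 (PySem.Set.add vf.2 c)) (v, f);
           loopB inv rest w.1 w.2) := by
  intro n
  induction n using Nat.strong_induction_on with
  | _ n ihn =>
    intro v hv k
    induction k using Nat.strong_induction_on with
    | _ k ihk =>
      intro children i hik rest f
      by_cases hle : children.length ≤ i
      · rw [loopB_done inv children i rest v f hle, List.drop_eq_nil_of_le hle]
        rfl
      · have hidx : i < children.length := by omega
        rw [loopB_step inv children i rest v f hle]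
        have hgetD : children.getD i "" = children[i] := List.getD_eq_getElem children "" hidx
        have hdrop : children.drop i = children[i] :: children.drop (i + 1) :=
          List.drop_eq_getElem_cons hidx
        rw [hgetD, hdrop]
        simp only [List.foldl_cons]
        by_cases hg : (!(PySem.Set.contains v children[i]) && (PySem.Dict.mk inv).contains children[i]) = true
        · rw [if_pos hg]
          have hvb : PySem.Set.contains v children[i] = false ∧ (PySem.Dict.mk inv).contains children[i] = true := by
            revert hg
            cases PySem.Set.contains v children[i] <;> cases (PySem.Dict.mk inv).contains children[i] <;> simp
          have hlt := muB_add_lt inv v children[i] hvb.1 hvb.2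
          have hstep : dfsI inv children[i] v (PySem.Set.add f children[i])
              = ((PySem.Dict.mk inv).getD children[i] []).foldl
                  (fun vf c => dfsI inv c vf.1 (PySem.Set.add vf.2 c))
                  (PySem.Set.add v children[i], PySem.Set.add f children[i]) := by
            rw [dfsI_eq, hvb.1, hvb.2]; simp
          rw [ihn (muB inv (PySem.Set.add v children[i])) (by omega) (PySem.Set.add v children[i]) (le_refl _)
              (((PySem.Dict.mk inv).getD children[i] []).length) _ 0 (by omega) _ _]
          simp only [List.drop_zero]
          rw [ihn (muB inv (PySem.Set.add v children[i])) (by omega) _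
              (le_trans (muB_mono inv (foldl_prefix (fun c v f => dfsI inv c v f) (fun c v f => dfsI_prefix inv c v f) _ _)) (le_refl _))
              children.length children (i + 1) (by omega) rest _]
          rw [hstep]
        · rw [if_neg hg]
          have hskip : dfsI inv children[i] v (PySem.Set.add f children[i]) = (v, PySem.Set.add f children[i]) := by
            rw [dfsI_eq]
            have hgf : (PySem.Set.contains v children[i] || !((PySem.Dict.mk inv).contains children[i])) = true := by
              revert hg
              cases PySem.Set.contains v children[i] <;> cases (PySem.Dict.mk inv).contains children[i] <;> simp
            rw [hgf]; simp
          rw [ihk (children.length - (i + 1)) (by omega) children (i + 1) (le_refl _) rest _]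
          rw [hskip]

-- ===== VERDICT (by name: the statement is the Claim_ definition above) =====
theorem get_containers_spec : Claim_equal_get_containers := by
  unfold Claim_equal_get_containers Spec_get_containers
  intro bag inv _
  unfold get_containers get_containers_alt
  have h0 : muB inv PySem.Set.empty ≤ inv.length := List.length_filter_le _ _
  have h1 : dfsA inv (inv.length + 1) bag PySem.Set.empty PySem.Set.empty
      = dfsI inv bag PySem.Set.empty PySem.Set.empty := by
    unfold dfsI
    exact dfsA_irrel inv (muB inv PySem.Set.empty) PySem.Set.empty (le_refl _) bag PySem.Set.empty _ _
      (by omega) (by omega)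
  rw [h1, dfsI_eq]
  have hvb : PySem.Set.contains PySem.Set.empty bag = false := rfl
  by_cases hkey : (PySem.Dict.mk inv).contains bag = true
  · rw [if_pos hkey, hvb, hkey]
    simp only [Bool.not_true, Bool.or_false, Bool.false_eq_true, if_false]
    rw [simLoop inv (muB inv (PySem.Set.add PySem.Set.empty bag)) (PySem.Set.add PySem.Set.empty bag) (le_refl _)
        (((PySem.Dict.mk inv).getD bag []).length) _ 0 (by omega) [] PySem.Set.empty]
    simp only [List.drop_zero, loopB_nil]
  · rw [if_neg hkey]
    have hkey' : (PySem.Dict.mk inv).contains bag = false := by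
      cases h : (PySem.Dict.mk inv).contains bag
      · rfl
      · exact absurd h hkey
    rw [hvb, hkey']
    simp only [Bool.not_false, Bool.or_true, if_true, loopB_nil]
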